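-- pv_equiv track=rewrite | github.com/simesaba80/yanbaru-Hack-z-back | backend/services/feature_analysis/analysis/syllable_detector.py | syllable_detector
-- ===== SOURCE A (Python) =====
-- def syllable_detector(sound, amplitude_peak_list):
--     """
--     まずリストsyllable_list_tmpを用意する
--     ピークの点と次の点の誤差が±1000以内に収まってるとき、カウント変数をインクリメントし、syllable_list_tmpに詰め込む
--     もしその次の点が次の点との誤差が大きい場合、カウント変数をリセットする。syllable_list_tmpの中身を捨てる
--     もしカウント変数が100以上で、かつ次の点との誤差が大きい場合、syllable_list_tmpの中身をsyllable_listに詰め込む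
--
--     syllable_list_tmpの中身をsyllable_listに詰め込む際、syllable_list_tmpというリスト自体を詰め込むので、
--     syllable_list内の要素内にはリストのみが詰まっていることになる。これでピークのまとまりが何種類かが分かる
--     """
--
--     syllable_list_tmp = []
--     syllable_list = []
--     count = 0
--
--     for i in range(len(amplitude_peak_list) - 1):
--         if (
--             count >= 100
--             and abs(amplitude_peak_list[i][0] - amplitude_peak_list[i + 1][0]) >= 1000
--         ):
--             syllable_list.append(syllable_list_tmp)
--             count = 0
--             syllable_list_tmp = []
--             continue
--
--         elif abs(amplitude_peak_list[i][0] - amplitude_peak_list[i + 1][0]) >= 1000: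
--             count = 0
--             syllable_list_tmp = []
--             continue
--
--         count += 1
--         syllable_list_tmp.append([amplitude_peak_list[i][0], amplitude_peak_list[i][1]])
--
--     # ループ終了後に、残った syllable_list_tmp を syllable_list に追加
--     if syllable_list_tmp:
--         syllable_list.append(syllable_list_tmp)
--
--     return syllable_list
-- ===== SOURCE B (Python) =====
-- def syllable_detector(sound, amplitude_peak_list):
--     n = len(amplitude_peak_list)
--     if n < 2:
--         return []
--     # pass 1: break positions (big gaps)
--     breaks = [i for i in range(n - 1)
--               if abs(amplitude_peak_list[i][0] - amplitude_peak_list[i + 1][0]) >= 1000]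
--     # pass 2: materialize kept runs between breaks
--     out = []
--     start = 0
--     for b in breaks:
--         if b - start >= 100:
--             out.append([[amplitude_peak_list[j][0], amplitude_peak_list[j][1]]
--                         for j in range(start, b)])
--         start = b + 1
--     if start < n - 1:
--         out.append([[amplitude_peak_list[j][0], amplitude_peak_list[j][1]]
--                     for j in range(start, n - 1)])
--     return out
-- ===== Notes on version B (the rewrite author's own statement) =====
-- stated objective: alternative
-- what changed: B replaces A's single stateful loop (running count plus a temporary buffer that is flushed or discarded) with two passes: first compute the break indices (gaps >= 1000), then materialize each kept run directly from index ranges between breaks.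
import Mathlib
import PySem

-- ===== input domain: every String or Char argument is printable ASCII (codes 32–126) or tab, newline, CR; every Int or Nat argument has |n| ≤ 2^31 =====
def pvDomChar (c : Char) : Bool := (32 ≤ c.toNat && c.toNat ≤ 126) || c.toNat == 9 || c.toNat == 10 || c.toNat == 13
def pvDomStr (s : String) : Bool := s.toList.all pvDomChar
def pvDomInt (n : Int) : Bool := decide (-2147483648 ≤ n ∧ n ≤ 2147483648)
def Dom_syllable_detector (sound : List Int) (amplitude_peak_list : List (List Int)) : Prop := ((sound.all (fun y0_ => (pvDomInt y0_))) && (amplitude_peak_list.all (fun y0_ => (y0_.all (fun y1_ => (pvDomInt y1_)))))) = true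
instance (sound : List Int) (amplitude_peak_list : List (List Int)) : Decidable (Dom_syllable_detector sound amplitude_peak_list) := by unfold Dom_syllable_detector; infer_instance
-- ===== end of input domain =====

-- B replaces A's single stateful loop (count + temporary buffer) with two passes: compute break
-- positions (gaps ≥ 1000), then materialize each kept run from index ranges (alternative decomposition).


-- ===== PORT A =====
-- shared with the B port: the gap test abs(p[i][0]-p[i+1][0]) >= 1000 and the element [p[j][0], p[j][1]]
-- (indices are in range under Pre_, so getD's defaults are never used there)
def pvGapBig (p : List (List Int)) (i : Nat) : Bool :=
  decide (1000 ≤ (((p.getD i []).getD 0 0) - ((p.getD (i+1) []).getD 0 0)).natAbs)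

def pvElem (p : List (List Int)) (j : Nat) : List Int :=
  [(p.getD j []).getD 0 0, (p.getD j []).getD 1 0]

-- literal transliteration of A: one loop over i, state (syllable_list_tmp, syllable_list, count)
def syllable_detector (sound : List Int) (amplitude_peak_list : List (List Int)) : List (List (List Int)) :=
  let res := (List.range (amplitude_peak_list.length - 1)).foldl
    (fun (st : List (List Int) × List (List (List Int)) × Int) (i : Nat) =>
      if (100 ≤ st.2.2) ∧ (pvGapBig amplitude_peak_list i = true) then
        (([] : List (List Int)), st.2.1 ++ [st.1], (0 : Int))
      else if pvGapBig amplitude_peak_list i = true then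
        ([], st.2.1, 0)
      else
        (st.1 ++ [pvElem amplitude_peak_list i], st.2.1, st.2.2 + 1))
    ([], [], 0)
  if res.1 ≠ [] then res.2.1 ++ [res.1] else res.2.1

-- ===== PORT B =====
-- [[p[j][0], p[j][1]] for j in range(s, e)]
def pvGrp (p : List (List Int)) (s e : Nat) : List (List Int) :=
  (List.range' s (e - s)).map (pvElem p)

-- transliteration of B: pass 1 the break indices, pass 2 the kept runs between them
def syllable_detector_alt (sound : List Int) (amplitude_peak_list : List (List Int)) : List (List (List Int)) :=
  let n := amplitude_peak_list.length
  if n < 2 then [] else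
    let breaks := (List.range (n - 1)).filter (pvGapBig amplitude_peak_list)
    let res := breaks.foldl
      (fun (st : List (List (List Int)) × Nat) (b : Nat) =>
        if 100 ≤ b - st.2 then (st.1 ++ [pvGrp amplitude_peak_list st.2 b], b + 1)
        else (st.1, b + 1))
      ([], 0)
    if res.2 < n - 1 then res.1 ++ [pvGrp amplitude_peak_list res.2 (n - 1)] else res.1

-- ===== PRECONDITION & SPEC =====
-- Pre_ is exactly where the Python A returns: each consecutive pair must be non-empty lists
-- (their [0] is read), and an element whose gap to the next is small must have a second entry
-- (its [1] is read); otherwise A raises IndexError.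
def Pre_syllable_detector (sound : List Int) (amplitude_peak_list : List (List Int)) : Prop :=
  ∀ pr ∈ amplitude_peak_list.zip amplitude_peak_list.tail,
    pr.1 ≠ [] ∧ pr.2 ≠ [] ∧ ((pr.1.headD 0 - pr.2.headD 0).natAbs < 1000 → 2 ≤ pr.1.length)

instance (sound : List Int) (amplitude_peak_list : List (List Int)) : Decidable (Pre_syllable_detector sound amplitude_peak_list) := by unfold Pre_syllable_detector; infer_instance

def pvWitness_syllable_detector : List Int × List (List Int) := ([], [[0, 0], [500, 1]])

def Spec_syllable_detector (sound : List Int) (amplitude_peak_list : List (List Int)) (out : List (List (List Int))) : Prop := out = syllable_detector_alt sound amplitude_peak_list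
instance (sound : List Int) (amplitude_peak_list : List (List Int)) (out : List (List (List Int))) : Decidable (Spec_syllable_detector sound amplitude_peak_list out) := by unfold Spec_syllable_detector; infer_instance

-- ===== CLAIM (what is proved, stated in full; the proofs are below) =====
def Claim_equal_syllable_detector : Prop := ∀ (sound : List Int) (amplitude_peak_list : List (List Int)), Dom_syllable_detector sound amplitude_peak_list → Pre_syllable_detector sound amplitude_peak_list → Spec_syllable_detector sound amplitude_peak_list (syllable_detector sound amplitude_peak_list)

-- ===== LEMMAS AND PROOFS =====

-- reference: the runs cut by break tokens; an interior run is kept iff its length ≥ 100,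
-- the final run is kept iff non-empty
def pvRuns : List (Bool × List Int) → List (List Int) → List (List (List Int))
  | [], tmp => if tmp ≠ [] then [tmp] else []
  | (b, e) :: ts, tmp =>
    if b then (if 100 ≤ tmp.length then tmp :: pvRuns ts [] else pvRuns ts [])
    else pvRuns ts (tmp ++ [e])

def pvTok (p : List (List Int)) (i : Nat) : Bool × List Int := (pvGapBig p i, pvElem p i)

theorem pvGrp_length (p : List (List Int)) (s e : Nat) : (pvGrp p s e).length = e - s := by
  simp [pvGrp]

theorem pvGrp_self (p : List (List Int)) (s : Nat) : pvGrp p s s = [] := by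
  simp [pvGrp]

theorem pvGrp_concat (p : List (List Int)) (s e : Nat) (h : s ≤ e) :
    pvGrp p s (e + 1) = pvGrp p s e ++ [pvElem p e] := by
  unfold pvGrp
  have h1 : e + 1 - s = (e - s) + 1 := by omega
  rw [h1, List.range'_concat]
  have h2 : s + (e - s) = e := by omega
  simp [h2]

-- A's loop, over an arbitrary index list, with the invariant count = |tmp|
theorem pvA (p : List (List Int)) (idx : List Nat) :
    ∀ (tmp : List (List Int)) (lst : List (List (List Int))),
    (let res := idx.foldl
      (fun (st : List (List Int) × List (List (List Int)) × Int) (i : Nat) =>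
        if (100 ≤ st.2.2) ∧ (pvGapBig p i = true) then
          (([] : List (List Int)), st.2.1 ++ [st.1], (0 : Int))
        else if pvGapBig p i = true then
          ([], st.2.1, 0)
        else
          (st.1 ++ [pvElem p i], st.2.1, st.2.2 + 1))
      (tmp, lst, (tmp.length : Int));
     if res.1 ≠ [] then res.2.1 ++ [res.1] else res.2.1)
    = lst ++ pvRuns (idx.map (pvTok p)) tmp := by
  induction idx with
  | nil =>
    intro tmp lst
    by_cases h : tmp = [] <;> simp [pvRuns, h]
  | cons i idx ih =>
    intro tmp lst
    simp only [List.foldl_cons, List.map_cons]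
    by_cases hg : pvGapBig p i = true
    · by_cases hc : (100 : Int) ≤ (tmp.length : Int)
      · have hcon : (100 ≤ (tmp.length : Int)) ∧ (pvGapBig p i = true) := ⟨hc, hg⟩
        rw [if_pos hcon]
        have hc' : 100 ≤ tmp.length := by exact_mod_cast hc
        have := ih ([] : List (List Int)) (lst ++ [tmp])
        simp only [List.length_nil, Int.natCast_zero] at this
        rw [this]
        simp [pvRuns, pvTok, hg, hc']
      · have : ¬ ((100 ≤ (tmp.length : Int)) ∧ (pvGapBig p i = true)) := fun h => hc h.1
        rw [if_neg this, if_pos hg]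
        have := ih ([] : List (List Int)) lst
        simp only [List.length_nil, Int.natCast_zero] at this
        rw [this]
        have hc' : ¬ 100 ≤ tmp.length := by
          intro h; exact hc (by exact_mod_cast h)
        simp [pvRuns, pvTok, hg, hc']
    · have h1 : ¬ ((100 ≤ (tmp.length : Int)) ∧ (pvGapBig p i = true)) := fun h => hg h.2
      rw [if_neg h1, if_neg hg]
      have hlen : (tmp.length : Int) + 1 = (((tmp ++ [pvElem p i]).length : Nat) : Int) := by
        simp
      rw [hlen, ih (tmp ++ [pvElem p i]) lst]
      simp [pvRuns, pvTok, hg]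

-- B's two passes, over the index range starting at s, with pending run start ≤ s
theorem pvB (p : List (List Int)) (m : Nat) :
    ∀ (s start : Nat) (out : List (List (List Int))), start ≤ s →
    (let res := ((List.range' s m).filter (pvGapBig p)).foldl
      (fun (st : List (List (List Int)) × Nat) (b : Nat) =>
        if 100 ≤ b - st.2 then (st.1 ++ [pvGrp p st.2 b], b + 1)
        else (st.1, b + 1))
      (out, start);
     if res.2 < s + m then res.1 ++ [pvGrp p res.2 (s + m)] else res.1)
    = out ++ pvRuns ((List.range' s m).map (pvTok p)) (pvGrp p start s) := by
  induction m with
  | zero =>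
    intro s start out h
    by_cases hs : start < s
    · have hne : pvGrp p start s ≠ [] := by
        intro he
        have := pvGrp_length p start s
        rw [he] at this
        simp at this
        omega
      simp [pvRuns, hs, hne]
    · have hss : start = s := by omega
      subst hss
      simp [pvRuns, pvGrp_self]
  | succ m ih =>
    intro s start out h
    rw [List.range'_succ]
    by_cases hg : pvGapBig p s = true
    · simp only [List.filter_cons, hg, if_pos, List.foldl_cons, List.map_cons]
      by_cases hc : 100 ≤ s - start
      · rw [if_pos hc]
        have := ih (s + 1) (s + 1) (out ++ [pvGrp p start s]) (le_refl _)
        rw [pvGrp_self] at this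
        have harith : s + 1 + m = s + (m + 1) := by omega
        rw [harith] at this
        rw [this]
        have hlen : 100 ≤ (pvGrp p start s).length := by rw [pvGrp_length]; exact hc
        simp [pvRuns, pvTok, hg, hlen]
      · rw [if_neg hc]
        have := ih (s + 1) (s + 1) out (le_refl _)
        rw [pvGrp_self] at this
        have harith : s + 1 + m = s + (m + 1) := by omega
        rw [harith] at this
        rw [this]
        have hlen : ¬ 100 ≤ (pvGrp p start s).length := by rw [pvGrp_length]; exact hc
        simp [pvRuns, pvTok, hg, hlen]
    · simp only [List.filter_cons, hg]
      simp only [Bool.false_eq_true, if_false, List.map_cons]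
      have := ih (s + 1) start out (by omega)
      have harith : s + 1 + m = s + (m + 1) := by omega
      rw [harith] at this
      rw [this]
      have hcat : pvGrp p start (s + 1) = pvGrp p start s ++ [pvElem p s] := pvGrp_concat p start s h
      rw [hcat]
      simp [pvRuns, pvTok, hg]

theorem pv_main (sound : List Int) (p : List (List Int)) :
    syllable_detector sound p = syllable_detector_alt sound p := by
  unfold syllable_detector syllable_detector_alt
  by_cases h2 : p.length < 2
  · have h0 : p.length - 1 = 0 := by omega
    simp [h0, h2]
  · simp only [if_neg h2]
    have hA := pvA p (List.range' 0 (p.length - 1)) [] []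
    simp only [List.length_nil, Int.natCast_zero, List.nil_append] at hA
    have hB := pvB p (p.length - 1) 0 0 [] (le_refl 0)
    rw [pvGrp_self] at hB
    simp only [Nat.zero_add, List.nil_append] at hB
    rw [List.range_eq_range']
    exact hA.trans hB.symm

-- ===== VERDICT (by name: the statement is the Claim_ definition above) =====
theorem syllable_detector_spec : Claim_equal_syllable_detector := by
  intro sound p _ _
  unfold Spec_syllable_detector
  exact pv_main sound p
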